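-- pv_equiv track=rewrite | github.com/GLKaiky/PucMinas | Ia/Lista 9/CodigoFonte.py | obter_vizinhos
-- ===== SOURCE A (Python) =====
-- def encontrar_vazio(estado):
--     """Encontra a posição (linha, coluna) do espaço vazio (0) no estado."""
--     for i in range(len(estado)):
--         for j in range(len(estado[i])):
--             if estado[i][j] == 0:
--                 return i, j
--     return None
--
-- def obter_vizinhos(estado):
--     """Gera todos os estados válidos que podem ser alcançados a partir do estado atual."""
--     linha_vazio, coluna_vazio = encontrar_vazio(estado)
--     tamanho = len(estado)
--     vizinhos = []
--     movimentos = [(0, 1), (0, -1), (1, 0), (-1, 0)]  # Direita, Esquerda, Baixo, Cima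
--
--     for dl, dc in movimentos:
--         nova_linha, nova_coluna = linha_vazio + dl, coluna_vazio + dc
--         if 0 <= nova_linha < tamanho and 0 <= nova_coluna < tamanho:
--             novo_estado = [list(linha) for linha in estado]
--             novo_estado[linha_vazio][coluna_vazio], novo_estado[nova_linha][nova_coluna] = \
--                 novo_estado[nova_linha][nova_coluna], novo_estado[linha_vazio][coluna_vazio]
--             vizinhos.append(tuple(tuple(linha) for linha in novo_estado))
--     return vizinhos
-- ===== SOURCE B (Python) =====
-- def obter_vizinhos(estado):
--     """Gera todos os estados validos alcancaveis a partir do estado atual.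
--
--     Estrategia: um unico primitivo 1-D troca o vazio com um vizinho DENTRO de uma linha;
--     os movimentos horizontais usam-no diretamente e os verticais reutilizam-no sobre a
--     TRANSPOSTA da grade (trocas na linha da transposta = trocas na coluna da original),
--     destranspondo cada resultado. Correto em grades quadradas: transpor e involutivo e
--     leva a coluna do vazio na linha j da transposta.
--     """
--     def trocas_na_linha(grade, i, j):
--         linha = grade[i]
--         out = []
--         for k in (j + 1, j - 1):
--             if 0 <= k < len(linha):
--                 nova = list(linha)
--                 nova[j], nova[k] = nova[k], nova[j]
--                 out.append(tuple(tuple(l) for l in grade[:i] + [nova] + grade[i + 1:]))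
--         return out
--
--     for i, linha in enumerate(estado):
--         if 0 in linha:
--             j = linha.index(0)
--             break
--     horiz = trocas_na_linha([list(l) for l in estado], i, j)
--     transposta = [list(c) for c in zip(*estado)]
--     vert = [tuple(zip(*g)) for g in trocas_na_linha(transposta, j, i)]
--     return horiz + vert
-- ===== Notes on version B (the rewrite author's own statement) =====
-- stated objective: alternative
-- what changed: B has no 2-D move deltas or per-move bounds checks on (row,col): a single 1-D primitive swaps the blank with a neighbour inside one row, horizontal neighbours use it directly and vertical neighbours reuse it on the TRANSPOSED grid (column swaps become row swaps), de-transposing each result, instead of A's four (dl,dc) offsets with 2-D bounds tests and nested row copies.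
-- outside the precondition, e.g. on obter_vizinhos([[1, 8, 0]]): A returns [], B returns [((1, 0, 8),)]
import Mathlib
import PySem

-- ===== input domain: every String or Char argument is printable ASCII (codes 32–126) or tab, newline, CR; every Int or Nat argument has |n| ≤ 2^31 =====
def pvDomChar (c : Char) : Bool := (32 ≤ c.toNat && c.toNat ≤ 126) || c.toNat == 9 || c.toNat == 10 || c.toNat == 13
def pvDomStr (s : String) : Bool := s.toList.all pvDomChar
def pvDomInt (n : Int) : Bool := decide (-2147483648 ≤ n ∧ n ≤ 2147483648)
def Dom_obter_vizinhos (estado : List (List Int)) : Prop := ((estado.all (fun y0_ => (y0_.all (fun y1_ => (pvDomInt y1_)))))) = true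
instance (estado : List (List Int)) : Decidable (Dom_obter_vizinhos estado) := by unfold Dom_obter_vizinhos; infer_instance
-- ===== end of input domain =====

-- B generates neighbours with one 1-D in-row swap primitive, reused on the TRANSPOSED grid for
-- the vertical moves (then de-transposed), instead of A's four 2-D move deltas with 2-D bounds
-- checks; equal output on square grids containing the blank 0.


-- ===== PORT A =====
-- inner loop of encontrar_vazio: 'for j in range(len(row)): if row[j] == 0: return j'
def pvFindZeroRow (row : List Int) (j : Nat) : Option Nat :=
  match row with
  | [] => none
  | x :: rest => if x == 0 then some j else pvFindZeroRow rest (j + 1)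

-- outer loop of encontrar_vazio over the rows
def pvEncontrarVazioAux (rows : List (List Int)) (i : Nat) : Option (Nat × Nat) :=
  match rows with
  | [] => none
  | r :: rest =>
    match pvFindZeroRow r 0 with
    | some j => some (i, j)
    | none => pvEncontrarVazioAux rest (i + 1)

def encontrar_vazio (estado : List (List Int)) : Option (Nat × Nat) :=
  pvEncontrarVazioAux estado 0

-- novo_estado[i][j] (in range under Pre_, 0 / [] defaults only pad the excluded inputs)
def pvGet2 (e : List (List Int)) (i j : Nat) : Int := (e.getD i []).getD j 0
-- novo_estado[i][j] = v
def pvSet2 (e : List (List Int)) (i j : Nat) (v : Int) : List (List Int) :=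
  e.set i ((e.getD i []).set j v)

def obter_vizinhos (estado : List (List Int)) : List (List (List Int)) :=
  match encontrar_vazio estado with
  | none => []   -- Python raises TypeError here (unpacking None); excluded by Pre_
  | some (linha_vazio, coluna_vazio) =>
    let tamanho : Int := estado.length
    let movimentos : List (Int × Int) := [(0, 1), (0, -1), (1, 0), (-1, 0)]
    movimentos.foldl (fun vizinhos m =>
      let nova_linha : Int := (linha_vazio : Int) + m.1
      let nova_coluna : Int := (coluna_vazio : Int) + m.2
      if 0 ≤ nova_linha ∧ nova_linha < tamanho ∧ 0 ≤ nova_coluna ∧ nova_coluna < tamanho then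
        let a := pvGet2 estado nova_linha.toNat nova_coluna.toNat
        let b := pvGet2 estado linha_vazio coluna_vazio
        vizinhos ++ [pvSet2 (pvSet2 estado linha_vazio coluna_vazio a) nova_linha.toNat nova_coluna.toNat b]
      else vizinhos) []

-- ===== PORT B =====
-- zip(*rows): length = min of row lengths, column j collects r[j] (getD defaults never read)
def pvZip (rows : List (List Int)) : List (List Int) :=
  match (rows.map List.length).min? with
  | none => []
  | some m => (List.range m).map (fun j => rows.map (fun r => r.getD j 0))

-- trocas_na_linha: swap the blank at (i, j) with position k of row i, for k = j+1 then j-1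
-- (grade[i] is always in range at B's call sites under Pre_; the [] default pads excluded inputs)
def pvTrocasNaLinha (grade : List (List Int)) (i j : Nat) : List (List (List Int)) :=
  let linha := grade.getD i []
  [((j : Int) + 1), ((j : Int) - 1)].foldl (fun out k =>
    if 0 ≤ k ∧ k < (linha.length : Int) then
      let nova := (linha.set j (linha.getD k.toNat 0)).set k.toNat (linha.getD j 0)
      out ++ [grade.take i ++ [nova] ++ grade.drop (i + 1)]
    else out) []

-- 'for i, linha in enumerate(estado): if 0 in linha: j = linha.index(0); break'
-- (index? is some exactly when 0 is in the row)
def pvAcharVazio (rows : List (List Int)) (i : Nat) : Option (Nat × Nat) :=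
  match rows with
  | [] => none
  | r :: rest =>
    match PySem.List.index? r 0 with
    | some j => some (i, j)
    | none => pvAcharVazio rest (i + 1)

def obter_vizinhos_alt (estado : List (List Int)) : List (List (List Int)) :=
  match pvAcharVazio estado 0 with
  | none => []   -- Python raises NameError here (i, j never bound); excluded by Pre_
  | some (i, j) =>
    let horiz := pvTrocasNaLinha estado i j
    let transposta := pvZip estado
    let vert := (pvTrocasNaLinha transposta j i).map pvZip
    horiz ++ vert

-- ===== PRECONDITION & SPEC =====
-- Pre_ restricts to the sliding puzzle's natural domain: a SQUARE grid containing the blank 0.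
-- Without a 0 both programs raise (A a TypeError, B a NameError); on non-square grids A still
-- returns, but its in-bounds column test accidentally uses the ROW count as the column bound,
-- so that behaviour is an artefact of A's square-grid assumption and is excluded.
def Pre_obter_vizinhos (estado : List (List Int)) : Prop :=
  (∀ r ∈ estado, r.length = estado.length) ∧ (0 : Int) ∈ estado.flatten
instance (estado : List (List Int)) : Decidable (Pre_obter_vizinhos estado) := by
  unfold Pre_obter_vizinhos; infer_instance

def pvWitness_obter_vizinhos : List (List Int) := [[1, 0], [2, 3]]

def Spec_obter_vizinhos (estado : List (List Int)) (out : List (List (List Int))) : Prop := out = obter_vizinhos_alt estado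
instance (estado : List (List Int)) (out : List (List (List Int))) : Decidable (Spec_obter_vizinhos estado out) := by unfold Spec_obter_vizinhos; infer_instance

-- ===== CLAIM (what is proved, stated in full; the proofs are below) =====
def Claim_equal_obter_vizinhos : Prop := ∀ (estado : List (List Int)), Dom_obter_vizinhos estado → Pre_obter_vizinhos estado → Spec_obter_vizinhos estado (obter_vizinhos estado)

-- ===== LEMMAS AND PROOFS =====

-- getD at an in-range index is getElem
lemma getD_lt {α : Type} (l : List α) (k : Nat) (d : α) (h : k < l.length) :
    l.getD k d = l[k] := by
  rw [List.getD_eq_getElem?_getD, List.getElem?_eq_getElem h]; rfl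

lemma getD_set_self {α : Type} (l : List α) (i : Nat) (x d : α) (h : i < l.length) :
    (l.set i x).getD i d = x := by
  rw [List.getD_eq_getElem?_getD, List.getElem?_set_self h]; rfl

lemma getD_set_ne {α : Type} (l : List α) (i k : Nat) (x d : α) (h : i ≠ k) :
    (l.set i x).getD k d = l.getD k d := by
  rw [List.getD_eq_getElem?_getD, List.getElem?_set_ne h, ← List.getD_eq_getElem?_getD]

lemma set_getD_self (l : List Int) (c : Nat) (h : c < l.length) :
    l.set c (l.getD c 0) = l := by
  rw [getD_lt l c 0 h]; exact List.set_getElem_self h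

lemma getD_map_range' {α : Type} (f : Nat → α) (n j : Nat) (d : α) (h : j < n) :
    ((List.range n).map f).getD j d = f j := by
  rw [List.getD_eq_getElem?_getD, List.getElem?_map, List.getElem?_range h]; rfl

-- reconstructing a row of known length from its entries
lemma row_recover (l : List Int) (n : Nat) (hl : l.length = n) :
    (List.range n).map (fun j => l.getD j 0) = l := by
  apply List.ext_getElem (by simp [hl])
  intro i h1 h2
  simp only [List.getElem_map, List.getElem_range]
  exact getD_lt l i 0 h2

-- the inner row scan of A is list.index restricted to 0
lemma pvFindZeroRow_eq (row : List Int) (k : Nat) :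
    pvFindZeroRow row k = (PySem.List.index? row 0).map (· + k) := by
  induction row generalizing k with
  | nil => simp [pvFindZeroRow, PySem.List.index?_eq_idxOf?, List.idxOf?]
  | cons x rest ih =>
    by_cases hx : x = 0
    · subst hx
      rw [PySem.List.index?_cons_self]
      simp [pvFindZeroRow]
    · rw [PySem.List.index?_cons_of_ne rest hx]
      simp only [pvFindZeroRow, beq_iff_eq, if_neg hx, ih (k + 1), Option.map_map]
      cases PySem.List.index? rest 0 with
      | none => simp
      | some a => simp; omega

-- A's 2-D scan and B's enumerate/index scan find the same first blank
lemma achar_eq (rows : List (List Int)) (i : Nat) :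
    pvEncontrarVazioAux rows i = pvAcharVazio rows i := by
  induction rows generalizing i with
  | nil => rfl
  | cons r rest ih =>
    simp only [pvEncontrarVazioAux, pvAcharVazio, pvFindZeroRow_eq]
    cases h : PySem.List.index? r 0 with
    | none => simp [ih]
    | some j => simp

lemma achar_some (rows : List (List Int)) (i : Nat) (hz : (0 : Int) ∈ rows.flatten) :
    ∃ p, pvAcharVazio rows i = some p := by
  induction rows generalizing i with
  | nil => simp at hz
  | cons r rest ih =>
    simp only [pvAcharVazio]
    cases h : PySem.List.index? r 0 with
    | some j => exact ⟨(i, j), rfl⟩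
    | none =>
      have hr : (0 : Int) ∉ r := (PySem.List.index?_eq_none_iff r 0).mp h
      have hz' : (0 : Int) ∈ rest.flatten := by
        simp only [List.flatten_cons, List.mem_append] at hz
        exact hz.resolve_left hr
      exact ih (i + 1) hz'

lemma achar_bounds (rows : List (List Int)) (i lv cv : Nat)
    (h : pvAcharVazio rows i = some (lv, cv)) :
    ∃ k, k < rows.length ∧ lv = i + k ∧ cv < (rows.getD k []).length := by
  induction rows generalizing i with
  | nil => simp [pvAcharVazio] at h
  | cons r rest ih =>
    simp only [pvAcharVazio] at h
    cases hidx : PySem.List.index? r 0 with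
    | some j =>
      rw [hidx] at h
      obtain ⟨h1, h2⟩ := Prod.mk.injEq .. ▸ (Option.some.injEq .. ▸ h)
      obtain ⟨hlt, -, -⟩ := PySem.List.getElem_of_index?_eq_some hidx
      exact ⟨0, by simp, by omega, by simpa [← h2] using hlt⟩
    | none =>
      rw [hidx] at h
      obtain ⟨k, hk1, hk2, hk3⟩ := ih (i + 1) h
      exact ⟨k + 1, by simpa using hk1, by omega, by simpa using hk3⟩

-- two writes into the same row collapse to one row update
lemma pvSet2_same_row (estado : List (List Int)) (lv c k : Nat)
    (hlv : lv < estado.length) (a b : Int) :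
    pvSet2 (pvSet2 estado lv c a) lv k b
      = estado.set lv (((estado.getD lv []).set c a).set k b) := by
  unfold pvSet2
  rw [getD_set_self estado lv _ [] hlv, List.set_set]

-- the columns view: pvZip of a rectangular non-empty grid
lemma pvZip_eq (rows : List (List Int)) (m : Nat)
    (hsq : ∀ r ∈ rows, r.length = m) (hne : rows ≠ []) :
    pvZip rows = (List.range m).map (fun j => rows.map (fun r => r.getD j 0)) := by
  have h1 : rows.map List.length = List.replicate rows.length m :=
    List.eq_replicate_iff.mpr ⟨by simp, by simpa using fun r hr => hsq r hr⟩
  unfold pvZip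
  rw [h1, List.min?_replicate_of_pos (List.length_pos_of_ne_nil hne)]

-- de-transposing the transpose with one column replaced performs the two column writes
lemma zip_set (estado : List (List Int)) (c lv nl : Nat)
    (hsq : ∀ r ∈ estado, r.length = estado.length)
    (hc : c < estado.length) (hlv : lv < estado.length) (_hnl : nl < estado.length)
    (hne2 : nl ≠ lv) (a b : Int) :
    pvZip ((pvZip estado).set c (((estado.map (fun r => r.getD c 0)).set lv a).set nl b))
      = pvSet2 (pvSet2 estado lv c a) nl c b := by
  have hne : estado ≠ [] := by intro h; rw [h] at hc; simp at hc
  set n := estado.length with hn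
  set col := estado.map (fun r => r.getD c 0) with hcol
  set r' := (col.set lv a).set nl b with hr'
  have hcollen : col.length = n := by rw [hcol, List.length_map]
  have hr'len : r'.length = n := by rw [hr', List.length_set, List.length_set]; exact hcollen
  have ht : pvZip estado = (List.range n).map (fun j => estado.map (fun r => r.getD j 0)) :=
    pvZip_eq estado n hsq hne
  have htlen : ((pvZip estado).set c r').length = n := by
    rw [List.length_set, ht, List.length_map, List.length_range]
  have hts : ∀ row ∈ (pvZip estado).set c r', row.length = n := by
    intro row hrow
    rcases List.mem_or_eq_of_mem_set hrow with h | h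
    · rw [ht] at h
      obtain ⟨j, -, hj⟩ := List.mem_map.mp h
      rw [← hj, List.length_map]
    · rw [h]; exact hr'len
  have htne : (pvZip estado).set c r' ≠ [] := by
    intro h; rw [h] at htlen; simp at htlen; omega
  rw [pvZip_eq _ n hts htne]
  -- pointwise comparison of the two grids
  apply List.ext_getElem (by simp [pvSet2, hn])
  intro i h1 h2
  have hi : i < n := by simpa using h1
  simp only [List.getElem_map, List.getElem_range]
  rw [List.map_set]
  have hrow_i : (pvZip estado).map (fun row => row.getD i 0) = estado[i] := by
    rw [ht, List.map_map]
    have : ∀ j ∈ List.range n,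
        ((fun row => row.getD i 0) ∘ fun j => estado.map (fun r => r.getD j 0)) j
          = (fun j => (estado[i]).getD j 0) j := by
      intro j hj
      simp only [Function.comp_apply]
      exact PySem.List.getD_map_of_lt _ _ _ _ (by omega)
    rw [List.map_congr_left this, row_recover estado[i] n (hsq _ (List.getElem_mem (by omega)))]
  rw [hrow_i]
  -- the right-hand side, row by row
  have hE1 : (estado.set lv ((estado.getD lv []).set c a)).getD nl []
      = estado.getD nl [] := getD_set_ne estado lv nl _ [] (fun h => hne2 h.symm)
  simp only [pvSet2, hE1]
  rw [List.getElem_set, List.getElem_set]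
  by_cases hinl : nl = i
  · simp only [if_pos hinl]
    subst hinl
    rw [hr', getD_set_self _ nl b 0 (by rw [List.length_set, hcollen]; omega),
      getD_lt estado nl [] (by omega)]
  · by_cases hilv : lv = i
    · simp only [if_neg hinl, if_pos hilv]
      subst hilv
      rw [hr', getD_set_ne _ nl lv b 0 hne2,
        getD_set_self col lv a 0 (by omega), getD_lt estado lv [] (by omega)]
    · simp only [if_neg hinl, if_neg hilv]
      rw [hr', getD_set_ne _ nl i b 0 hinl,
        getD_set_ne col lv i a 0 hilv, hcol,
        PySem.List.getD_map_of_lt _ _ _ _ (by omega)]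
      exact set_getD_self estado[i] c (by rw [hsq _ (List.getElem_mem (by omega))]; omega)

-- the horizontal half: B's in-row swaps are A's right/left neighbours
lemma horiz_eq (estado : List (List Int)) (lv cv : Nat)
    (hsq : ∀ r ∈ estado, r.length = estado.length)
    (hlv : lv < estado.length) (hcv : cv < estado.length) :
    pvTrocasNaLinha estado lv cv =
      (if cv + 1 < estado.length then
        [pvSet2 (pvSet2 estado lv cv (pvGet2 estado lv (cv + 1))) lv (cv + 1) (pvGet2 estado lv cv)] else []) ++
      (if 0 < cv then
        [pvSet2 (pvSet2 estado lv cv (pvGet2 estado lv (cv - 1))) lv (cv - 1) (pvGet2 estado lv cv)] else []) := by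
  set n := estado.length with hn
  have hrow : (estado.getD lv []).length = n := by
    rw [getD_lt estado lv [] hlv]; exact hsq _ (List.getElem_mem hlv)
  unfold pvTrocasNaLinha
  simp only [List.foldl_cons, List.foldl_nil, hrow]
  have e1 : ((0:Int) ≤ (cv:Int) + 1 ∧ (cv:Int) + 1 < (n:Int)) ↔ cv + 1 < n := by omega
  have e2 : ((0:Int) ≤ (cv:Int) - 1 ∧ (cv:Int) - 1 < (n:Int)) ↔ 0 < cv := by omega
  have t1 : ((cv:Int) + 1).toNat = cv + 1 := by omega
  have t2 : ((cv:Int) - 1).toNat = cv - 1 := by omega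
  simp only [e1, e2, t1, t2]
  have hset : ∀ k : Nat, estado.take lv ++
        [((estado.getD lv []).set cv ((estado.getD lv []).getD k 0)).set k ((estado.getD lv []).getD cv 0)]
        ++ estado.drop (lv + 1)
      = pvSet2 (pvSet2 estado lv cv (pvGet2 estado lv k)) lv k (pvGet2 estado lv cv) := by
    intro k
    rw [pvSet2_same_row estado lv cv k hlv]
    rw [List.set_eq_take_cons_drop _ hlv]
    simp [pvGet2]
  by_cases h1 : cv + 1 < n <;> by_cases h2 : 0 < cv
  · simp only [h1, h2, if_true, List.nil_append]
    rw [hset (cv + 1), hset (cv - 1)]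
  · simp only [h1, h2, if_true, if_false, List.nil_append, List.append_nil]
    rw [hset (cv + 1)]
  · simp only [h1, h2, if_true, if_false, List.nil_append]
    rw [hset (cv - 1)]
  · simp only [h1, h2, if_false, List.append_nil]

-- the vertical half: B's in-row swaps on the transpose, de-transposed, are A's down/up neighbours
lemma vert_eq (estado : List (List Int)) (lv cv : Nat)
    (hsq : ∀ r ∈ estado, r.length = estado.length)
    (hlv : lv < estado.length) (hcv : cv < estado.length) :
    (pvTrocasNaLinha (pvZip estado) cv lv).map pvZip =
      (if lv + 1 < estado.length then
        [pvSet2 (pvSet2 estado lv cv (pvGet2 estado (lv + 1) cv)) (lv + 1) cv (pvGet2 estado lv cv)] else []) ++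
      (if 0 < lv then
        [pvSet2 (pvSet2 estado lv cv (pvGet2 estado (lv - 1) cv)) (lv - 1) cv (pvGet2 estado lv cv)] else []) := by
  have hne : estado ≠ [] := by intro h; rw [h] at hlv; simp at hlv
  set n := estado.length with hn
  have ht : pvZip estado = (List.range n).map (fun j => estado.map (fun r => r.getD j 0)) :=
    pvZip_eq estado n hsq hne
  have htlen : (pvZip estado).length = n := by simp [ht]
  have hlinha : (pvZip estado).getD cv [] = estado.map (fun r => r.getD cv 0) := by
    rw [ht]; exact getD_map_range' _ n cv [] hcv
  have hlinlen : ((pvZip estado).getD cv []).length = n := by rw [hlinha, List.length_map]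
  have hcolget : ∀ k : Nat, k < n →
      ((pvZip estado).getD cv []).getD k 0 = pvGet2 estado k cv := by
    intro k hk
    rw [hlinha, PySem.List.getD_map_of_lt _ _ _ _ (by omega)]
    unfold pvGet2
    rw [getD_lt estado k [] (by omega)]
  unfold pvTrocasNaLinha
  simp only [List.foldl_cons, List.foldl_nil, hlinlen]
  have e1 : ((0:Int) ≤ (lv:Int) + 1 ∧ (lv:Int) + 1 < (n:Int)) ↔ lv + 1 < n := by omega
  have e2 : ((0:Int) ≤ (lv:Int) - 1 ∧ (lv:Int) - 1 < (n:Int)) ↔ 0 < lv := by omega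
  have t1 : ((lv:Int) + 1).toNat = lv + 1 := by omega
  have t2 : ((lv:Int) - 1).toNat = lv - 1 := by omega
  simp only [e1, e2, t1, t2]
  have hset : ∀ k : Nat, k < n → k ≠ lv →
      pvZip ((pvZip estado).take cv ++
        [(((pvZip estado).getD cv []).set lv (((pvZip estado).getD cv []).getD k 0)).set k
          (((pvZip estado).getD cv []).getD lv 0)] ++ (pvZip estado).drop (cv + 1))
      = pvSet2 (pvSet2 estado lv cv (pvGet2 estado k cv)) k cv (pvGet2 estado lv cv) := by
    intro k hk hkne
    rw [hcolget k hk, hcolget lv (by omega)]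
    have hstep : (pvZip estado).take cv ++
        [(((pvZip estado).getD cv []).set lv (pvGet2 estado k cv)).set k (pvGet2 estado lv cv)]
        ++ (pvZip estado).drop (cv + 1)
        = (pvZip estado).set cv
            (((estado.map (fun r => r.getD cv 0)).set lv (pvGet2 estado k cv)).set k (pvGet2 estado lv cv)) := by
      have hcvlen : cv < (pvZip estado).length := by omega
      rw [List.set_eq_take_cons_drop _ hcvlen, hlinha]
      simp
    rw [hstep]
    exact zip_set estado cv lv k hsq hcv hlv (by omega) hkne _ _
  by_cases h1 : lv + 1 < n <;> by_cases h2 : 0 < lv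
  · simp only [h1, h2, if_true, List.nil_append, List.map_append, List.map_cons, List.map_nil]
    rw [hset (lv + 1) (by omega) (by omega), hset (lv - 1) (by omega) (by omega)]
  · simp only [h1, h2, if_true, if_false, List.nil_append, List.append_nil, List.map_cons, List.map_nil]
    rw [hset (lv + 1) (by omega) (by omega)]
  · simp only [h1, h2, if_true, if_false, List.nil_append, List.map_cons, List.map_nil]
    rw [hset (lv - 1) (by omega) (by omega)]
  · simp only [h1, h2, if_false, List.append_nil, List.map_nil]

-- ===== VERDICT (by name: the statement is the Claim_ definition above) =====
theorem obter_vizinhos_spec : Claim_equal_obter_vizinhos := by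
  intro estado _ hpre
  obtain ⟨hsq, hz⟩ := hpre
  unfold Spec_obter_vizinhos
  set n := estado.length with hn
  obtain ⟨⟨lv, cv⟩, hFind⟩ := achar_some estado 0 hz
  obtain ⟨k, hk1, hk2, hk3⟩ := achar_bounds estado 0 lv cv hFind
  have hlv : lv < n := by omega
  have hcv : cv < n := by
    have := hsq (estado.getD k []) (by rw [getD_lt estado k [] hk1]; exact List.getElem_mem hk1)
    omega
  have hA : encontrar_vazio estado = some (lv, cv) := by
    rw [encontrar_vazio, achar_eq]; exact hFind
  simp only [obter_vizinhos, obter_vizinhos_alt, hA, hFind, ← hn]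
  rw [horiz_eq estado lv cv hsq (by omega) (by omega),
    vert_eq estado lv cv hsq (by omega) (by omega), ← hn]
  simp only [List.foldl_cons, List.foldl_nil]
  have eAR : ((0:Int) ≤ (lv:Int) + 0 ∧ (lv:Int) + 0 < (n:Int) ∧ (0:Int) ≤ (cv:Int) + 1 ∧ (cv:Int) + 1 < (n:Int)) ↔ cv + 1 < n := by omega
  have eAL : ((0:Int) ≤ (lv:Int) + 0 ∧ (lv:Int) + 0 < (n:Int) ∧ (0:Int) ≤ (cv:Int) + -1 ∧ (cv:Int) + -1 < (n:Int)) ↔ 0 < cv := by omega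
  have eAD : ((0:Int) ≤ (lv:Int) + 1 ∧ (lv:Int) + 1 < (n:Int) ∧ (0:Int) ≤ (cv:Int) + 0 ∧ (cv:Int) + 0 < (n:Int)) ↔ lv + 1 < n := by omega
  have eAU : ((0:Int) ≤ (lv:Int) + -1 ∧ (lv:Int) + -1 < (n:Int) ∧ (0:Int) ≤ (cv:Int) + 0 ∧ (cv:Int) + 0 < (n:Int)) ↔ 0 < lv := by omega
  have tR : ((cv:Int) + 1).toNat = cv + 1 := by omega
  have tL : ((cv:Int) + -1).toNat = cv - 1 := by omega
  have tD : ((lv:Int) + 1).toNat = lv + 1 := by omega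
  have tU : ((lv:Int) + -1).toNat = lv - 1 := by omega
  have t0l : ((lv:Int) + 0).toNat = lv := by omega
  have t0c : ((cv:Int) + 0).toNat = cv := by omega
  simp only [eAR, eAL, eAD, eAU, tR, tL, tD, tU, t0l, t0c]
  by_cases hR : cv + 1 < n <;> by_cases hL : 0 < cv <;> by_cases hD : lv + 1 < n <;> by_cases hU : 0 < lv <;>
    simp [hR, hL, hD, hU]
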